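-- pv_equiv track=rewrite | github.com/STF33/Glider-Guidance-System | GGS_DataToolbox_GUI/X_DataToolbox_SensorTools.py | get_units_dict
-- ===== SOURCE A (Python) =====
-- def get_units_dict(sensor_list, master_dict):
--
--     '''
--     Build a dictionary mapping each sensor in sensor_list to its unit based on the first file in master_dict that provides a value.
--
--     Args:
--     - sensor_list (list): List of sensor names.
--     - master_dict (dict): Master dictionary of parsed files.
--
--     Returns:
--     - units_dict (dict): Mapping from sensor name to its unit (or an empty string if not found).
--     '''
--
--     units_dict = {}
--     for sensor in sensor_list:
--         unit = ""
--         for content in master_dict.values():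
--             if "data" in content and sensor in content["data"]:
--                 unit = content["data"][sensor].get("units", "")
--                 break
--         units_dict[sensor] = unit
--     return units_dict
-- ===== SOURCE B (Python) =====
-- def get_units_dict(sensor_list, master_dict):
--     first = {}
--     for content in master_dict.values():
--         data = content.get("data")
--         if data is not None:
--             for sensor, props in data.items():
--                 if sensor not in first:
--                     first[sensor] = props.get("units", "")
--     return {sensor: first.get(sensor, "") for sensor in sensor_list}
-- ===== Notes on version B (the rewrite author's own statement) =====
-- stated objective: faster
-- what changed: Instead of rescanning every file for every sensor (with an inner break), B makes one pass over the files building a first-occurrence sensor-to-unit map and then answers each sensor by a single dict lookup.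
import Mathlib
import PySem

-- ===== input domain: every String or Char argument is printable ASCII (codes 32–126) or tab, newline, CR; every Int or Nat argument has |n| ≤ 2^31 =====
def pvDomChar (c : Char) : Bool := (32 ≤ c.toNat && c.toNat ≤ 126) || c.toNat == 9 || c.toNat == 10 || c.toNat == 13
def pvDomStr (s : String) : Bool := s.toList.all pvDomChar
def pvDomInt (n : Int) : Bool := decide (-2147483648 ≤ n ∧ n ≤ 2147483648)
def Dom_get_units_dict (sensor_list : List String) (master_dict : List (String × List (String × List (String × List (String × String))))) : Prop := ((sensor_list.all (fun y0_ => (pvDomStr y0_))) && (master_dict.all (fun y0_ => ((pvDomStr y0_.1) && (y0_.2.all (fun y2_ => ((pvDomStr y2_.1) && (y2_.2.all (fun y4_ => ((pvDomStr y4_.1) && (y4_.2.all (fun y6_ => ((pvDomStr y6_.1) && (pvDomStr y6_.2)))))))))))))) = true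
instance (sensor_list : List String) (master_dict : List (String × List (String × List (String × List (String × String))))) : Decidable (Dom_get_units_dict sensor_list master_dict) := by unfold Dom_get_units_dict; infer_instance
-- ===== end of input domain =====

-- B replaces A's per-sensor rescan of all files by one pass over the files building a
-- first-occurrence sensor→unit map, then a single lookup per sensor (objective: faster).

-- ===== PORT A =====
-- A's inner loop: for content in master_dict.values(): if "data" in content and
-- sensor in content["data"]: unit = content["data"][sensor].get("units",""); break
def pvAFind (sensor : String) : List (List (String × List (String × List (String × String)))) → String
  | [] => ""
  | content :: rest =>
    match (PySem.Dict.mk content).get? "data" with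
    | some data =>
      match (PySem.Dict.mk data).get? sensor with
      | some props => (PySem.Dict.mk props).getD "units" ""
      | none => pvAFind sensor rest
    | none => pvAFind sensor rest

def get_units_dict (sensor_list : List String) (master_dict : List (String × List (String × List (String × List (String × String))))) : List (String × String) :=
  (sensor_list.foldl
    (fun units_dict sensor => units_dict.insert sensor (pvAFind sensor (master_dict.map Prod.snd)))
    (PySem.Dict.empty : PySem.Dict String String)).items

-- ===== PORT B =====
-- inner loop of Source B: for sensor, props in data.items(): if sensor not in first: first[sensor] = props.get("units","")
def pvBStep (first : PySem.Dict String String) (content : List (String × List (String × List (String × String)))) : PySem.Dict String String :=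
  match (PySem.Dict.mk content).get? "data" with
  | none => first
  | some data =>
    data.foldl
      (fun f p => if f.contains p.1 then f else f.insert p.1 ((PySem.Dict.mk p.2).getD "units" ""))
      first

def get_units_dict_alt (sensor_list : List String) (master_dict : List (String × List (String × List (String × List (String × String))))) : List (String × String) :=
  let first := (master_dict.map Prod.snd).foldl pvBStep (PySem.Dict.empty : PySem.Dict String String)
  (sensor_list.foldl
    (fun d sensor => d.insert sensor (first.getD sensor ""))
    (PySem.Dict.empty : PySem.Dict String String)).items

-- ===== PRECONDITION & SPEC =====
def Spec_get_units_dict (sensor_list : List String) (master_dict : List (String × List (String × List (String × List (String × String))))) (out : List (String × String)) : Prop := out = get_units_dict_alt sensor_list master_dict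
instance (sensor_list : List String) (master_dict : List (String × List (String × List (String × List (String × String))))) (out : List (String × String)) : Decidable (Spec_get_units_dict sensor_list master_dict out) := by unfold Spec_get_units_dict; infer_instance

-- ===== CLAIM (what is proved, stated in full; the proofs are below) =====
def Claim_equal_get_units_dict : Prop := ∀ (sensor_list : List String) (master_dict : List (String × List (String × List (String × List (String × String))))), Dom_get_units_dict sensor_list master_dict → Spec_get_units_dict sensor_list master_dict (get_units_dict sensor_list master_dict)

-- ===== LEMMAS AND PROOFS =====

-- the per-data-dict fold of B looked up at s: earlier entries of `f` win, else first match in `data`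
lemma pvB_inner_get? (data : List (String × List (String × String))) (f : PySem.Dict String String) (s : String) :
    (data.foldl
      (fun f p => if f.contains p.1 then f else f.insert p.1 ((PySem.Dict.mk p.2).getD "units" ""))
      f).get? s =
    ((f.get? s).or (((PySem.Dict.mk data).get? s).map (fun props => (PySem.Dict.mk props).getD "units" ""))) := by
  induction data generalizing f with
  | nil => simp [PySem.Dict.get?]
  | cons p rest ih =>
    obtain ⟨k, props⟩ := p
    simp only [List.foldl_cons, ih, PySem.Dict.get?_mk_cons]
    by_cases hk : k = s
    · subst hk
      by_cases hc : (f.contains k : Bool)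
      · have hs : (f.get? k).isSome := by rw [← PySem.Dict.contains_eq_isSome_get?]; exact hc
        rcases h : f.get? k with _ | u
        · rw [h] at hs; simp at hs
        · simp [hc, h]
      · simp only [Bool.not_eq_true] at hc
        have h0 : f.get? k = none := by
          rcases h : f.get? k with _ | u
          · rfl
          · have := PySem.Dict.contains_eq_isSome_get? f k
            rw [h, hc] at this; simp at this
        simp [hc, PySem.Dict.get?_insert_self, h0]
    · have hks : (k == s) = false := beq_eq_false_iff_ne.mpr hk
      by_cases hc : (f.contains k : Bool)
      · simp [hc, hks]
      · simp only [Bool.not_eq_true] at hc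
        simp [hc, hks, PySem.Dict.get?_insert_of_ne f _ (Ne.symm hk)]

-- the whole file pass of B looked up at s equals A's first-file search
lemma pvB_outer (s : String) (L : List (List (String × List (String × List (String × String))))) (f : PySem.Dict String String) :
    (L.foldl pvBStep f).getD s "" =
      (match f.get? s with
       | some u => u
       | none => pvAFind s L) := by
  induction L generalizing f with
  | nil => simp [PySem.Dict.getD_eq_get?_getD]; rcases f.get? s with _ | u <;> simp [pvAFind]
  | cons content rest ih =>
    simp only [List.foldl_cons, ih, pvBStep, pvAFind]
    rcases hd : (PySem.Dict.mk content).get? "data" with _ | data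
    · rfl
    · rw [pvB_inner_get?]
      rcases hf : f.get? s with _ | u
      · simp only [Option.none_or]
        rcases hs : (PySem.Dict.mk data).get? s with _ | props <;> simp
      · simp

lemma pvA_eq_first (s : String) (master_dict : List (String × List (String × List (String × List (String × String))))) :
    pvAFind s (master_dict.map Prod.snd) =
      ((master_dict.map Prod.snd).foldl pvBStep (PySem.Dict.empty : PySem.Dict String String)).getD s "" := by
  rw [pvB_outer]
  simp [PySem.Dict.get?_empty]

-- ===== VERDICT (by name: the statement is the Claim_ definition above) =====
theorem get_units_dict_spec : Claim_equal_get_units_dict := by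
  intro sensor_list master_dict _
  unfold Spec_get_units_dict get_units_dict get_units_dict_alt
  congr 1
  apply PySem.List.foldl_congr_mem
  intro d s _
  rw [pvA_eq_first]
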